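-- pv_equiv track=rewrite | github.com/sameep-git/tes | lambda_solver/solver_core.py | _build_course_lookup
-- ===== SOURCE A (Python) =====
-- from typing import Any, Dict, List, Tuple
--
-- def _course_key(course: dict) -> str:
--     return f"{course['code']} | {course['name']}"
--
-- def _build_course_lookup(courses: List[dict]) -> Dict[str, str]:
--     lookup: Dict[str, str] = {}
--     code_to_keys: Dict[str, set] = {}
--     for course in courses:
--         key = _course_key(course)
--         lookup[key] = key
--         code_to_keys.setdefault(course["code"], set()).add(key)
--
--     for code, keys in code_to_keys.items():
--         if len(keys) == 1:
--             lookup[code] = next(iter(keys))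
--
--     return lookup
-- ===== SOURCE B (Python) =====
-- def _course_key(course):
--     return f"{course['code']} | {course['name']}"
--
--
-- def _build_course_lookup(courses):
--     lookup = {_course_key(c): _course_key(c) for c in courses}
--     for code in dict.fromkeys(c["code"] for c in courses):
--         keys = {_course_key(c) for c in courses if c["code"] == code}
--         if len(keys) == 1:
--             lookup[code] = keys.pop()
--     return lookup
-- ===== Notes on version B (the rewrite author's own statement) =====
-- stated objective: alternative
-- what changed: Replaces A's incrementally built dict-of-key-sets and its items() filtering pass with a declarative formulation: a comprehension builds the full-key lookup, then for each distinct code the course list is rescanned to collect that code's distinct keys, adding the shortcut when there is exactly one.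
import Mathlib
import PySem

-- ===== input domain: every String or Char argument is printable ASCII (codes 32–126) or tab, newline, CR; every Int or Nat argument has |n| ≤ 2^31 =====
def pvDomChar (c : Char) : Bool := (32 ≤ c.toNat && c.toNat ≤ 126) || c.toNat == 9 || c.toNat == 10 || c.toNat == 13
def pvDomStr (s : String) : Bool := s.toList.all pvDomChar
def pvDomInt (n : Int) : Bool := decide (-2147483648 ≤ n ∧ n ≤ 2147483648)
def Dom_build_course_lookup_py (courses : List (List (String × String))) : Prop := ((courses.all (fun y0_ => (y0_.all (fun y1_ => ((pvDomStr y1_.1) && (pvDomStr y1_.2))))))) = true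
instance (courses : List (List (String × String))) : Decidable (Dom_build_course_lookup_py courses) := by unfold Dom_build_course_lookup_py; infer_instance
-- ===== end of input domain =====

-- B replaces A's incrementally built dict-of-key-sets and its items() filtering pass with a
-- declarative formulation: a comprehension for the full keys, then one rescan of the course
-- list per distinct code (objective: alternative; no speed claim).

-- ===== PORT A =====
-- course["code"] / course["name"]: first-match lookup in the association list; a missing key is a
-- Python KeyError, excluded by Pre_ below (the .getD "" default is never reached inside Pre_).
def pvCourseCode (c : List (String × String)) : String := (List.lookup "code" c).getD ""

def pvCourseName (c : List (String × String)) : String := (List.lookup "name" c).getD ""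

-- f"{course['code']} | {course['name']}" (concatenation of ASCII pieces; exact)
def pvCourseKey (c : List (String × String)) : String := pvCourseCode c ++ " | " ++ pvCourseName c

-- one iteration of A's first loop: lookup[key] = key; code_to_keys.setdefault(code, set()).add(key)
def pvStepA (st : PySem.Dict String String × PySem.Dict String (PySem.Set String))
    (c : List (String × String)) :
    PySem.Dict String String × PySem.Dict String (PySem.Set String) :=
  let key := pvCourseKey c
  (st.1.insert key key,
   st.2.modify (pvCourseCode c) PySem.Set.empty (fun s => PySem.Set.add s key))

def build_course_lookup_py (courses : List (List (String × String))) : List (String × String) :=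
  let st := courses.foldl pvStepA (PySem.Dict.empty, PySem.Dict.empty)
  -- second loop: for code, keys in code_to_keys.items(): if len(keys) == 1: lookup[code] = next(iter(keys))
  -- next(iter(keys)) ported as List.headD "": exact, because the guard makes the set a singleton
  (st.2.items.foldl
    (fun lk p => if PySem.Set.len p.2 = 1 then lk.insert p.1 (p.2.headD "") else lk)
    st.1).items

-- ===== PORT B =====
def build_course_lookup_py_alt (courses : List (List (String × String))) : List (String × String) :=
  -- lookup = {_course_key(c): _course_key(c) for c in courses}
  let lookup := courses.foldl (fun d c => d.insert (pvCourseKey c) (pvCourseKey c)) PySem.Dict.empty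
  -- for code in dict.fromkeys(c["code"] for c in courses):
  ((PySem.List.dedup (courses.map pvCourseCode)).foldl
    (fun lk code =>
      -- keys = {_course_key(c) for c in courses if c["code"] == code}
      let ks : PySem.Set String :=
        PySem.Set.ofList ((courses.filter (fun c => pvCourseCode c == code)).map pvCourseKey)
      -- keys.pop() on the singleton set ported as List.headD "": exact under the len == 1 guard
      if PySem.Set.len ks = 1 then lk.insert code (ks.headD "") else lk)
    lookup).items

-- ===== PRECONDITION & SPEC =====
-- Pre_ excludes exactly the inputs where Python A raises KeyError: a course missing the "code" or "name" key.
def Pre_build_course_lookup_py (courses : List (List (String × String))) : Prop :=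
  (courses.all (fun c => (List.lookup "code" c).isSome && (List.lookup "name" c).isSome)) = true

instance (courses : List (List (String × String))) : Decidable (Pre_build_course_lookup_py courses) := by
  unfold Pre_build_course_lookup_py; infer_instance

def pvWitness_build_course_lookup_py : (List (List (String × String))) :=
  [[("code", "CS1"), ("name", "Intro")], [("code", "CS1"), ("name", "Logic")]]

def Spec_build_course_lookup_py (courses : List (List (String × String))) (out : List (String × String)) : Prop := out = build_course_lookup_py_alt courses
instance (courses : List (List (String × String))) (out : List (String × String)) : Decidable (Spec_build_course_lookup_py courses out) := by unfold Spec_build_course_lookup_py; infer_instance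

-- ===== CLAIM (what is proved, stated in full; the proofs are below) =====
def Claim_equal_build_course_lookup_py : Prop := ∀ (courses : List (List (String × String))), Dom_build_course_lookup_py courses → Pre_build_course_lookup_py courses → Spec_build_course_lookup_py courses (build_course_lookup_py courses)

-- ===== LEMMAS AND PROOFS =====

-- A's first loop updates its two components independently; the first is B's comprehension dict
lemma pvFold_fst (courses : List (List (String × String)))
    (lk : PySem.Dict String String) (d : PySem.Dict String (PySem.Set String)) :
    (courses.foldl pvStepA (lk, d)).1
      = courses.foldl (fun d c => d.insert (pvCourseKey c) (pvCourseKey c)) lk := by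
  induction courses generalizing lk d with
  | nil => rfl
  | cons c cs ih => simpa [pvStepA] using ih _ _

lemma pvFold_snd (courses : List (List (String × String)))
    (lk : PySem.Dict String String) (d : PySem.Dict String (PySem.Set String)) :
    (courses.foldl pvStepA (lk, d)).2
      = courses.foldl
          (fun d c => d.modify (pvCourseCode c) PySem.Set.empty
            (fun s => PySem.Set.add s (pvCourseKey c))) d := by
  induction courses generalizing lk d with
  | nil => rfl
  | cons c cs ih => simpa [pvStepA] using ih _ _

-- the value A's code_to_keys holds at any code: the distinct keys of that code's courses, in order
lemma pvGetD_fold_modify (courses : List (List (String × String)))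
    (d : PySem.Dict String (PySem.Set String)) (code : String) :
    (courses.foldl
        (fun d c => d.modify (pvCourseCode c) PySem.Set.empty
          (fun s => PySem.Set.add s (pvCourseKey c))) d).getD code PySem.Set.empty
      = PySem.Set.update (d.getD code PySem.Set.empty)
          ((courses.filter (fun c => pvCourseCode c == code)).map pvCourseKey) := by
  induction courses generalizing d with
  | nil => simp [PySem.Set.update]
  | cons c cs ih =>
    simp only [List.foldl_cons, List.filter_cons]
    by_cases h : pvCourseCode c = code
    · rw [if_pos (by simpa using h)]
      rw [ih, h, PySem.Dict.getD_modify_self]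
      simp [PySem.Set.update]
    · rw [if_neg (by simpa using h)]
      rw [ih, PySem.Dict.getD_modify, if_neg (fun hc => h hc.symm)]

-- ===== VERDICT (by name: the statement is the Claim_ definition above) =====
theorem build_course_lookup_py_spec : Claim_equal_build_course_lookup_py := by
  intro courses _ _
  unfold Spec_build_course_lookup_py
  simp only [build_course_lookup_py, build_course_lookup_py_alt]
  rw [pvFold_fst]
  -- name A's grouping dict
  set st2 := (courses.foldl pvStepA (PySem.Dict.empty, PySem.Dict.empty)).2 with hst2
  have hsnd := pvFold_snd courses PySem.Dict.empty PySem.Dict.empty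
  -- keys of A's grouping dict = the distinct codes, in first-occurrence order
  have hkeys : st2.keys = PySem.List.dedup (courses.map pvCourseCode) := by
    rw [hst2, hsnd, PySem.Dict.keys_foldl_modify_key]
    simp [PySem.Dict.keys_empty, PySem.Set.update, PySem.Set.ofList_eq_foldl]
  have hnd : st2.keys.Nodup := by
    rw [hkeys]; exact PySem.List.nodup_dedup _
  -- A's second loop as a fold over the distinct codes
  rw [PySem.Dict.items_eq_map_keys st2 hnd PySem.Set.empty, List.foldl_map, hkeys]
  refine congrArg PySem.Dict.items ?_
  apply PySem.List.foldl_congr_mem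
  intro lk code _
  have hval : st2.getD code PySem.Set.empty
      = PySem.Set.ofList ((courses.filter (fun c => pvCourseCode c == code)).map pvCourseKey) := by
    rw [hst2, hsnd, pvGetD_fold_modify]
    simp [PySem.Dict.getD_empty, PySem.Set.update, PySem.Set.ofList_eq_foldl, PySem.Set.empty]
  simp only [hval]
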